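-- pv_equiv track=rewrite | github.com/VISUALBoostcampCV/CodingStudy | [211214] 거스름돈/hans.py | solution
-- ===== SOURCE A (Python) =====
-- def solution(n, money):
--     answer = 0
--     money_map = []
--     for i in range(n):
--         tmp = []
--         for m in money:
--             if (i+1)%m==0:
--                 tmp.append(1)
--             else:
--                 tmp.append(0)
--         money_map.append(tmp)
--
--     key = money_map[-1]
--     for m in money_map[:-1]:
--         for i, _m in enumerate(m):
--             if key[i]:
--                 answer += m[i+1:].count(1)
--     answer += key.count(1)
--
--     return answer
-- ===== SOURCE B (Python) =====
-- def solution(n, money):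
--     # One pass per row with a running suffix count of 1s, instead of
--     # counting a slice for every position: O(n*k) vs A's O(n*k^2),
--     # and O(1) extra memory instead of storing the whole n*k map.
--     key = [1 if n % m == 0 else 0 for m in money]
--     answer = key.count(1)
--     for i in range(n - 1):
--         suffix = 0
--         for j in range(len(money) - 1, -1, -1):
--             if key[j]:
--                 answer += suffix
--             if (i + 1) % money[j] == 0:
--                 suffix += 1
--     return answer
-- ===== Notes on version B (the rewrite author's own statement) =====
-- stated objective: faster
-- what changed: B replaces A's per-position slice-and-count (m[i+1:].count(1) inside a double loop) and the stored n*k divisibility map by a single reverse pass per row that maintains a running suffix count of 1s, streaming rows instead of materialising money_map.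
import Mathlib
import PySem

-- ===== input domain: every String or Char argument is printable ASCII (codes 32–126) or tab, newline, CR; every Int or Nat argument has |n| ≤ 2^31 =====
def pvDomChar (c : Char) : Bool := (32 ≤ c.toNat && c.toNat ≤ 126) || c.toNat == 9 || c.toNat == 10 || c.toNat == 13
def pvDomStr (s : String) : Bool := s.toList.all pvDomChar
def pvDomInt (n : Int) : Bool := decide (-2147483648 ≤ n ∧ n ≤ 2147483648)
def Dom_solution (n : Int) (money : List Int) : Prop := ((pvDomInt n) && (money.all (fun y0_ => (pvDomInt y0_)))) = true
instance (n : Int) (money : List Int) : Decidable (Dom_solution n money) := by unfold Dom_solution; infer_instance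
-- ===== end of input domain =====

-- B replaces the per-position slice-and-count by one reverse pass per row keeping a
-- running suffix count of 1s (O(n*k) instead of O(n*k^2)); return values proved equal.

-- ===== PORT A =====
def solution (n : Int) (money : List Int) : Int :=
  let money_map := (PySem.List.pyRange 0 n 1).foldl (fun mm i =>
    mm ++ [money.foldl (fun tmp m =>
      tmp ++ [if PySem.Int.mod (i + 1) m = 0 then (1 : Int) else 0]) []]) []
  let key := PySem.List.pyGetD money_map (-1) []
  let answer := (PySem.List.slice money_map none (some (-1))).foldl (fun answer m =>
    (PySem.List.enumerate m 0).foldl (fun answer p =>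
      if PySem.List.pyGetD key p.1 0 ≠ 0 then
        answer + (PySem.List.count (PySem.List.slice m (some (p.1 + 1)) none) 1 : Int)
      else answer) answer) 0
  answer + (PySem.List.count key 1 : Int)

-- ===== PORT B =====
def solution_alt (n : Int) (money : List Int) : Int :=
  let key := money.map (fun m => if PySem.Int.mod n m = 0 then (1 : Int) else 0)
  let answer : Int := (PySem.List.count key 1 : Int)
  (PySem.List.pyRange 0 (n - 1) 1).foldl (fun answer i =>
    ((PySem.List.pyRange ((money.length : Int) - 1) (-1) (-1)).foldl
      (fun (p : Int × Int) j =>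
        (if PySem.List.pyGetD key j 0 ≠ 0 then p.1 + p.2 else p.1,
         if PySem.Int.mod (i + 1) (PySem.List.pyGetD money j 0) = 0 then p.2 + 1 else p.2))
      (answer, 0)).1) answer

-- ===== PRECONDITION & SPEC =====
-- Pre_ excludes exactly the inputs where the Python A raises: n ≤ 0 (money_map is
-- empty, so money_map[-1] is an IndexError) and 0 ∈ money (ZeroDivisionError).
def Pre_solution (n : Int) (money : List Int) : Prop := 1 ≤ n ∧ (0 : Int) ∉ money
instance (n : Int) (money : List Int) : Decidable (Pre_solution n money) := by
  unfold Pre_solution; infer_instance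

def pvWitness_solution : Int × List Int := (3, [1, 2])

def Spec_solution (n : Int) (money : List Int) (out : Int) : Prop := out = solution_alt n money
instance (n : Int) (money : List Int) (out : Int) : Decidable (Spec_solution n money out) := by
  unfold Spec_solution; infer_instance

-- ===== CLAIM (what is proved, stated in full; the proofs are below) =====
def Claim_equal_solution : Prop := ∀ (n : Int) (money : List Int), Dom_solution n money → Pre_solution n money → Spec_solution n money (solution n money)

-- ===== LEMMAS AND PROOFS =====

-- the divisibility row of step i
def pvRow (i : Int) (money : List Int) : List Int :=
  money.map (fun m => if PySem.Int.mod (i + 1) m = 0 then (1 : Int) else 0)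

-- common spec of one row's contribution: for each position with a key hit,
-- the number of 1s strictly after it in the row
def pvG : List Int → List Int → Int
  | kx :: k', _rx :: r' => (if kx ≠ 0 then (PySem.List.count r' 1 : Int) else 0) + pvG k' r'
  | _, _ => 0

theorem pvG_nil2 (k : List Int) : pvG k [] = 0 := by cases k <;> rfl

theorem pvG_append (k r : List Int) (kx rx : Int) (hlen : k.length = r.length)
    (hrx : rx = 0 ∨ rx = 1) :
    pvG (k ++ [kx]) (r ++ [rx]) =
      pvG k r + ((k.countP (fun x => decide (x ≠ 0)) : Int)) * rx := by
  induction k generalizing r with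
  | nil =>
    cases r with
    | nil => simp [pvG]
    | cons ra r' => simp at hlen
  | cons ka k' ih =>
    cases r with
    | nil => simp at hlen
    | cons ra r' =>
      simp only [List.cons_append, pvG]
      rw [ih r' (by simpa using hlen)]
      rcases hrx with h | h <;> subst h <;>
        by_cases hka : ka = 0 <;>
          simp [List.count_append, hka] <;> push_cast <;> ring

-- generic additive fold
theorem pvFoldlAdd (g : Int → Int) (L : List Int) (a : Int) :
    L.foldl (fun acc x => acc + g x) a = a + (L.map g).sum := by
  induction L generalizing a with
  | nil => simp
  | cons x t ih => simp [ih]; ring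

theorem pvFoldlCongr {α : Type} (L : List α) (f f' : Int → α → Int) (a : Int)
    (h : ∀ a x, x ∈ L → f a x = f' a x) : L.foldl f a = L.foldl f' a := by
  induction L generalizing a with
  | nil => rfl
  | cons x t ih => simp only [List.foldl_cons]; rw [h a x (by simp), ih _ (fun a y hy => h a y (by simp [hy]))]

-- A's inner loop equals pvG
theorem pvAinner (k r : List Int) (t : List Int) (s : Nat) (a : Int)
    (ht : r.drop s = t) (hlen : s + t.length = k.length) :
    (PySem.List.enumerate t (s : Int)).foldl (fun ans p =>
      if PySem.List.pyGetD k p.1 0 ≠ 0 then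
        ans + (PySem.List.count (PySem.List.slice r (some (p.1 + 1)) none) 1 : Int)
      else ans) a = a + pvG (k.drop s) t := by
  induction t generalizing s a with
  | nil => simp [PySem.List.enumerate_nil, pvG_nil2]
  | cons x t' ih =>
    have hs : s < k.length := by simp at hlen; omega
    have hdrop : r.drop (s + 1) = t' := by
      rw [← List.drop_drop, ht]; simp
    rw [PySem.List.enumerate_cons]
    simp only [List.foldl_cons]
    have hget : PySem.List.pyGetD k ((s : Int)) 0 = k[s] := by
      rw [PySem.List.pyGetD_natCast]
      exact List.getD_eq_getElem k 0 hs
    have hslice : PySem.List.slice r (some ((s : Int) + 1)) none = t' := by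
      have : ((s : Int) + 1) = ((s + 1 : Nat) : Int) := by push_cast; ring
      rw [this, PySem.List.slice_from_natCast, hdrop]
    have hkd : k.drop s = k[s] :: k.drop (s + 1) := List.drop_eq_getElem_cons hs
    have hcast : ((s : Int) + 1) = (((s + 1 : Nat) : Int)) := by push_cast; ring
    rw [hcast] at *
    rw [ih (s + 1) _ hdrop (by simp at hlen ⊢; omega)]
    rw [hkd]
    simp only [hget, hslice, pvG]
    by_cases h : k[s] = 0
    · simp [h]
    · simp [h]
      rw [hslice]
      ring

-- B's inner loop, with invariant
theorem pvBinner (i : Int) (money k : List Int) (hk : k.length = money.length)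
    (c : Nat) (hc : c ≤ money.length) (a s : Int) :
    (PySem.List.pyRange ((c : Int) - 1) (-1) (-1)).foldl
      (fun (p : Int × Int) j =>
        (if PySem.List.pyGetD k j 0 ≠ 0 then p.1 + p.2 else p.1,
         if PySem.Int.mod (i + 1) (PySem.List.pyGetD money j 0) = 0 then p.2 + 1 else p.2))
      (a, s)
    = (a + pvG (k.take c) ((pvRow i money).take c)
         + s * ((k.take c).countP (fun x => decide (x ≠ 0)) : Int),
       s + (PySem.List.count ((pvRow i money).take c) 1 : Int)) := by
  induction c generalizing a s with
  | zero =>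
    have h0 : ((0 : Nat) : Int) - 1 = -1 := by norm_num
    rw [h0, PySem.List.pyRange_neg_one_eq_nil (by omega)]
    simp [pvG]
  | succ c ih =>
    have hc' : c < money.length := by omega
    have hck : c < k.length := by omega
    have hrl : c < (pvRow i money).length := by simp [pvRow]; omega
    have h1 : ((c + 1 : Nat) : Int) - 1 = (c : Int) := by push_cast; ring
    rw [h1, PySem.List.pyRange_neg_one_cons (by omega)]
    simp only [List.foldl_cons]
    have hgk : PySem.List.pyGetD k ((c : Int)) 0 = k[c] := by
      rw [PySem.List.pyGetD_natCast]; exact List.getD_eq_getElem k 0 hck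
    have hgm : PySem.List.pyGetD money ((c : Int)) 0 = money[c] := by
      rw [PySem.List.pyGetD_natCast]; exact List.getD_eq_getElem money 0 hc'
    have hrow : (pvRow i money)[c] = if PySem.Int.mod (i + 1) money[c] = 0 then (1 : Int) else 0 := by
      simp [pvRow]
    rw [hgk, hgm, ih (by omega)]
    have htk : k.take (c + 1) = k.take c ++ [k[c]] := by
      rw [List.take_succ]; simp [List.getElem?_eq_getElem hck]
    have htr : (pvRow i money).take (c + 1) = (pvRow i money).take c ++ [(pvRow i money)[c]] := by
      rw [List.take_succ]; simp [List.getElem?_eq_getElem hrl]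
    rw [htk, htr, pvG_append _ _ _ _ (by simp [pvRow]; omega) (by rw [hrow]; split_ifs <;> simp)]
    simp only [List.countP_append, hrow]
    by_cases hkc : k[c] = 0 <;> by_cases hm : PySem.Int.mod (i + 1) money[c] = 0 <;>
      simp [hkc, hm] <;> (try ring) <;> (try exact ⟨trivial, trivial⟩)

-- ===== VERDICT (by name: the statement is the Claim_ definition above) =====
theorem solution_spec : Claim_equal_solution := by
  unfold Claim_equal_solution Spec_solution
  intro n money _hdom hpre
  obtain ⟨hn, -⟩ := hpre
  have hkeylen : (pvRow (n - 1) money).length = money.length := by simp [pvRow]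
  have hrange : PySem.List.pyRange 0 n 1 = PySem.List.pyRange 0 (n - 1) 1 ++ [n - 1] := by
    have h := PySem.List.pyRange_one_succ_right (a := 0) (b := n - 1) (by omega)
    simpa using h
  have hinner : ∀ i : Int,
      money.foldl (fun tmp m =>
        tmp ++ [if PySem.Int.mod (i + 1) m = 0 then (1 : Int) else 0]) [] = pvRow i money := by
    intro i
    simpa [pvRow] using
      (PySem.List.foldl_append_singleton_eq_map
        (f := fun m => if PySem.Int.mod (i + 1) m = 0 then (1 : Int) else 0)
        (l := money) (acc := []))
  have hA : solution n money =
      ((PySem.List.pyRange 0 (n - 1) 1).map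
        (fun i => pvG (pvRow (n - 1) money) (pvRow i money))).sum
        + (PySem.List.count (pvRow (n - 1) money) 1 : Int) := by
    unfold solution
    have hmap : (PySem.List.pyRange 0 n 1).foldl (fun mm i =>
        mm ++ [money.foldl (fun tmp m =>
          tmp ++ [if PySem.Int.mod (i + 1) m = 0 then (1 : Int) else 0]) []]) [] =
        (PySem.List.pyRange 0 (n - 1) 1).map (fun i => pvRow i money)
          ++ [pvRow (n - 1) money] := by
      rw [PySem.List.foldl_append_singleton_eq_map]
      simp only [List.nil_append]
      rw [List.map_congr_left (fun i _ => hinner i), hrange, List.map_append]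
      simp
    simp only [hmap, PySem.List.pyGetD_neg_one_append_singleton,
      PySem.List.slice_to_neg_one, List.dropLast_concat]
    rw [List.foldl_map]
    rw [pvFoldlCongr _ _ (fun a i => a + pvG (pvRow (n - 1) money) (pvRow i money)) _
      (fun a i _ => by
        have h := pvAinner (pvRow (n - 1) money) (pvRow i money) (pvRow i money) 0 a
          List.drop_zero (by simp [pvRow])
        simpa using h)]
    rw [pvFoldlAdd]
    simp
  have hB : solution_alt n money =
      (PySem.List.count (pvRow (n - 1) money) 1 : Int)
        + ((PySem.List.pyRange 0 (n - 1) 1).map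
            (fun i => pvG (pvRow (n - 1) money) (pvRow i money))).sum := by
    unfold solution_alt
    have hkey : money.map (fun m => if PySem.Int.mod n m = 0 then (1 : Int) else 0)
        = pvRow (n - 1) money := by
      simp [pvRow]
    simp only [hkey]
    rw [pvFoldlCongr _ _ (fun a i => a + pvG (pvRow (n - 1) money) (pvRow i money)) _
      (fun a i _ => by
        have h := pvBinner i money (pvRow (n - 1) money) hkeylen money.length (le_refl _) a 0
        have htk : (pvRow (n - 1) money).take money.length = pvRow (n - 1) money := by
          rw [← hkeylen]; exact List.take_length
        have htr : (pvRow i money).take money.length = pvRow i money := by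
          have : (pvRow i money).length = money.length := by simp [pvRow]
          rw [← this]; exact List.take_length
        rw [htk, htr] at h
        simp only [h]
        ring)]
    rw [pvFoldlAdd]
  rw [hA, hB]
  ring
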